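-- pv_equiv track=rewrite | github.com/Aaron349899401/myprograms | ccc/ccc_sgt_challenge.py | minimize_max_diff
-- ===== SOURCE A (Python) =====
-- def minimize_max_diff(arr, K):
--     arr.sort()
--     diffs = []
--
--     for i in range(1, len(arr)):
--         diffs.append(arr[i] - arr[i-1])
--
--     diffs.sort(reverse=True)
--
--     # Remove the K-1 largest gaps
--     for _ in range(K - 1):
--         diffs.pop(0)
--
--     # The remaining largest gap determines the answer
--     return sum(diffs)
-- ===== SOURCE B (Python) =====
-- def minimize_max_diff(arr, K):
--     # Sorts arr in place like A; equivalence is about the return value.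
--     # Single pass over adjacent gaps maintaining a bounded ascending buffer of
--     # the K-1 largest gaps seen so far; answer = (max-min) minus removed gaps.
--     arr.sort()
--     total = arr[-1] - arr[0] if len(arr) >= 2 else 0
--     top = []  # ascending buffer of the K-1 largest gaps seen so far
--     for i in range(1, len(arr)):
--         g = arr[i] - arr[i - 1]
--         if len(top) < K - 1:
--             _insert_asc(top, g)
--         elif top and g > top[0]:
--             top.pop(0)
--             _insert_asc(top, g)
--     return total - sum(top)
--
--
-- def _insert_asc(top, g):
--     j = 0
--     while j < len(top) and top[j] <= g:
--         j += 1
--     top.insert(j, g)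
-- ===== Notes on version B (the rewrite author's own statement) =====
-- stated objective: alternative
-- what changed: Instead of sorting the gap list descending and removing the K-1 largest by repeated pop(0), B makes a single pass over the adjacent gaps maintaining a bounded ascending buffer of the K-1 largest gaps seen so far, and returns (max-min) minus the buffered gaps.
import Mathlib
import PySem

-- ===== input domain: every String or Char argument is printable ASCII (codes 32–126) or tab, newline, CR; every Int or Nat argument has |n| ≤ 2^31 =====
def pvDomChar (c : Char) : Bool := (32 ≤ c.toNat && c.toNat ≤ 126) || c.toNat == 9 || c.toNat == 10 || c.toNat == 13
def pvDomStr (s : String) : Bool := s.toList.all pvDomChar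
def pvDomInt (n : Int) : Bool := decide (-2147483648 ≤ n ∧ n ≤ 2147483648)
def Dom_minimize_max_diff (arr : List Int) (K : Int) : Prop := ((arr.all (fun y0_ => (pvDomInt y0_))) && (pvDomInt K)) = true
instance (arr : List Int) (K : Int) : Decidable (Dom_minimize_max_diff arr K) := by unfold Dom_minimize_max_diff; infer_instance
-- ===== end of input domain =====

-- B replaces A's gap sort + K-1 pop(0) loop by a single pass over the gaps that
-- maintains a bounded ascending buffer of the K-1 largest gaps seen so far, and
-- returns (max - min) minus the buffered gaps (alternative algorithm; A also
-- sorts arr in place — B performs the same mutation; the equivalence proved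
-- here is about the return value).

-- ===== PORT A =====
def minimize_max_diff (arr : List Int) (K : Int) : Int :=
  let s := PySem.List.sorted arr (fun x => x) false
  let diffs := (PySem.List.pyRange 1 (PySem.List.len s) 1).foldl
      (fun ds i => ds ++ [PySem.List.pyGetD s i 0 - PySem.List.pyGetD s (i - 1) 0]) []
  let diffs := PySem.List.sorted diffs (fun x => x) true
  let diffs := (PySem.List.pyRange 0 (K - 1) 1).foldl
      (fun ds _ => ((PySem.List.pop? ds 0).map Prod.snd).getD ds) diffs
  diffs.sum

-- ===== PORT B =====
-- _insert_asc: walk past the elements ≤ g, place g there (Python's while + insert)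
def pvInsertAsc (g : Int) : List Int → List Int
  | [] => [g]
  | x :: xs => if x ≤ g then x :: pvInsertAsc g xs else g :: x :: xs

-- body of B's for-loop: bounded buffer of the K-1 largest gaps, kept ascending
def pvStep (K : Int) (top : List Int) (g : Int) : List Int :=
  if (top.length : Int) < K - 1 then pvInsertAsc g top
  else match top with
    | [] => top
    | t0 :: rest => if t0 < g then pvInsertAsc g rest else t0 :: rest

def minimize_max_diff_alt (arr : List Int) (K : Int) : Int :=
  let s := PySem.List.sorted arr (fun x => x) false
  let total := if 2 ≤ s.length then PySem.List.pyGetD s (-1) 0 - PySem.List.pyGetD s 0 0 else 0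
  let top := (PySem.List.pyRange 1 (PySem.List.len s) 1).foldl
      (fun top i => pvStep K top (PySem.List.pyGetD s i 0 - PySem.List.pyGetD s (i - 1) 0)) []
  total - top.sum

-- ===== PRECONDITION & SPEC =====
-- A raises IndexError (pop from empty list) when K-1 exceeds the number of adjacent gaps.
def Pre_minimize_max_diff (arr : List Int) (K : Int) : Prop := K ≤ max (arr.length : Int) 1
instance (arr : List Int) (K : Int) : Decidable (Pre_minimize_max_diff arr K) := by unfold Pre_minimize_max_diff; infer_instance

def pvWitness_minimize_max_diff : List Int × Int := ([1, 5, 2], 2)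

def Spec_minimize_max_diff (arr : List Int) (K : Int) (out : Int) : Prop := out = minimize_max_diff_alt arr K
instance (arr : List Int) (K : Int) (out : Int) : Decidable (Spec_minimize_max_diff arr K out) := by unfold Spec_minimize_max_diff; infer_instance

-- ===== CLAIM (what is proved, stated in full; the proofs are below) =====
def Claim_equal_minimize_max_diff : Prop := ∀ (arr : List Int) (K : Int), Dom_minimize_max_diff arr K → Pre_minimize_max_diff arr K → Spec_minimize_max_diff arr K (minimize_max_diff arr K)

-- ===== LEMMAS AND PROOFS =====

-- pvInsertAsc produces a permutation of g :: l
theorem insertAsc_perm (g : Int) (l : List Int) : (pvInsertAsc g l).Perm (g :: l) := by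
  induction l with
  | nil => simp [pvInsertAsc]
  | cons x xs ih =>
      by_cases h : x ≤ g
      · simpa [pvInsertAsc, h] using ((ih.cons x).trans (List.Perm.swap g x xs))
      · simp [pvInsertAsc, h]

-- pvInsertAsc preserves ascending order
theorem insertAsc_pairwise (g : Int) (l : List Int) (h : l.Pairwise (· ≤ ·)) :
    (pvInsertAsc g l).Pairwise (· ≤ ·) := by
  induction l with
  | nil => simp [pvInsertAsc]
  | cons x xs ih =>
      rcases List.pairwise_cons.mp h with ⟨hx, hxs⟩
      by_cases hxg : x ≤ g
      · rw [show pvInsertAsc g (x :: xs) = x :: pvInsertAsc g xs from by simp [pvInsertAsc, hxg]]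
        refine List.pairwise_cons.mpr ⟨?_, ih hxs⟩
        intro y hy
        rcases List.mem_cons.mp ((insertAsc_perm g xs).mem_iff.mp hy) with rfl | hy'
        · exact hxg
        · exact hx _ hy'
      · rw [show pvInsertAsc g (x :: xs) = g :: x :: xs from by simp [pvInsertAsc, hxg]]
        refine List.pairwise_cons.mpr ⟨?_, h⟩
        intro y hy
        rcases List.mem_cons.mp hy with rfl | hy'
        · omega
        · have := hx _ hy'; omega

-- inserting into the ascending sort of p gives the ascending sort of p ++ [g]
theorem insertAsc_sorted (g : Int) (p : List Int) :
    pvInsertAsc g (PySem.List.sorted p (fun x => x) false) = PySem.List.sorted (p ++ [g]) (fun x => x) false := by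
  have hperm : (pvInsertAsc g (PySem.List.sorted p (fun x => x) false)).Perm (p ++ [g]) := by
    refine (insertAsc_perm g _).trans ?_
    refine (((PySem.List.sorted_perm ..).cons g).trans ?_)
    exact (List.perm_append_singleton g p).symm
  exact (PySem.List.sorted_id_eq_of_perm_of_pairwise (p ++ [g]) _ hperm
    (insertAsc_pairwise g _ (PySem.List.sorted_pairwise p (fun x => x)))).symm

-- if g is ≤ every element, pvInsertAsc prepends (up to equal values)
theorem insertAsc_of_le (g : Int) (l : List Int) (h : ∀ y ∈ l, g ≤ y) :
    pvInsertAsc g l = g :: l := by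
  induction l with
  | nil => rfl
  | cons x t ih =>
      have hgx : g ≤ x := h x (List.mem_cons_self ..)
      by_cases hxg : x ≤ g
      · have hx : x = g := le_antisymm hxg hgx
        subst hx
        rw [show pvInsertAsc x (x :: t) = x :: pvInsertAsc x t from by simp [pvInsertAsc]]
        rw [ih (fun y hy => h y (List.mem_cons_of_mem _ hy))]
      · simp [pvInsertAsc, hxg]

-- g ≤ l[d]: inserting g does not change the suffix beyond position d
theorem insertAsc_drop_of_le (g : Int) (l : List Int) (hp : l.Pairwise (· ≤ ·)) :
    ∀ d (hd : d < l.length), g ≤ l[d] → (pvInsertAsc g l).drop (d + 1) = l.drop d := by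
  induction l with
  | nil => intro d hd; simp at hd
  | cons x xs ih =>
      rcases List.pairwise_cons.mp hp with ⟨hx, hxs⟩
      intro d hd hg
      cases d with
      | zero =>
          simp only [List.getElem_cons_zero] at hg
          by_cases hxg : x ≤ g
          · have hx' : x = g := le_antisymm hxg hg
            rw [show pvInsertAsc g (x :: xs) = x :: pvInsertAsc g xs from by simp [pvInsertAsc, hxg]]
            rw [List.drop_succ_cons, List.drop_zero, List.drop_zero]
            rw [insertAsc_of_le g xs (fun y hy => hx' ▸ hx y hy), hx']
          · rw [show pvInsertAsc g (x :: xs) = g :: x :: xs from by simp [pvInsertAsc, hxg]]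
            simp
      | succ d =>
          simp only [List.getElem_cons_succ] at hg
          have hd' : d < xs.length := by simpa using hd
          by_cases hxg : x ≤ g
          · rw [show pvInsertAsc g (x :: xs) = x :: pvInsertAsc g xs from by simp [pvInsertAsc, hxg]]
            rw [List.drop_succ_cons, List.drop_succ_cons]
            exact ih hxs d hd' hg
          · rw [show pvInsertAsc g (x :: xs) = g :: x :: xs from by simp [pvInsertAsc, hxg]]
            rw [List.drop_succ_cons, List.drop_succ_cons]

-- l[d] < g: the suffix beyond d of the insertion is the insertion into the suffix
theorem insertAsc_drop_of_lt (g : Int) (l : List Int) (hp : l.Pairwise (· ≤ ·)) :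
    ∀ d (hd : d < l.length), l[d] < g → (pvInsertAsc g l).drop (d + 1) = pvInsertAsc g (l.drop (d + 1)) := by
  induction l with
  | nil => intro d hd; simp at hd
  | cons x xs ih =>
      rcases List.pairwise_cons.mp hp with ⟨hx, hxs⟩
      intro d hd hg
      cases d with
      | zero =>
          simp only [List.getElem_cons_zero] at hg
          rw [show pvInsertAsc g (x :: xs) = x :: pvInsertAsc g xs from by simp [pvInsertAsc, le_of_lt hg]]
          simp
      | succ d =>
          simp only [List.getElem_cons_succ] at hg
          have hd' : d < xs.length := by simpa using hd
          have hxg : x ≤ g := le_of_lt (lt_of_le_of_lt (hx _ (List.getElem_mem hd')) hg)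
          rw [show pvInsertAsc g (x :: xs) = x :: pvInsertAsc g xs from by simp [pvInsertAsc, hxg]]
          rw [List.drop_succ_cons, List.drop_succ_cons]
          exact ih hxs d hd' hg

-- one step of B's loop, acting on the suffix characterisation of the buffer
theorem step_drop (K : Int) (p : List Int) (g : Int) :
    pvStep K ((PySem.List.sorted p (fun x => x) false).drop (p.length - (K - 1).toNat)) g
      = (PySem.List.sorted (p ++ [g]) (fun x => x) false).drop (p.length + 1 - (K - 1).toNat) := by
  set l := PySem.List.sorted p (fun x => x) false with hl
  have hn : l.length = p.length := PySem.List.length_sorted ..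
  have hpw : l.Pairwise (· ≤ ·) := PySem.List.sorted_pairwise ..
  have hins : pvInsertAsc g l = PySem.List.sorted (p ++ [g]) (fun x => x) false := insertAsc_sorted g p
  have hinslen : (pvInsertAsc g l).length = l.length + 1 := (insertAsc_perm g l).length_eq
  set m := (K - 1).toNat with hm
  rw [← hins]
  by_cases hcase : p.length < m
  · -- buffer not yet full: condition true, top = l
    have h0 : p.length - m = 0 := by omega
    have hlen : (((l.drop (p.length - m)).length : Int)) < K - 1 := by
      rw [List.length_drop, hn]; omega
    simp only [pvStep, if_pos hlen]
    have h1 : p.length + 1 - m = 0 := by omega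
    rw [h0, h1, List.drop_zero, List.drop_zero]
  · rw [not_lt] at hcase
    have hcond : ¬ (((l.drop (p.length - m)).length : Int) < K - 1) := by
      rw [List.length_drop, hn]; omega
    simp only [pvStep, if_neg hcond]
    by_cases hm0 : m = 0
    · have htop : l.drop (p.length - m) = [] := by
        apply List.drop_eq_nil_of_le; omega
      rw [htop]
      have : (pvInsertAsc g l).drop (p.length + 1 - m) = [] := by
        apply List.drop_eq_nil_of_le; omega
      rw [this]
    · have hd : p.length - m < l.length := by omega
      have htop : l.drop (p.length - m) = l[p.length - m] :: l.drop (p.length - m + 1) :=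
        List.drop_eq_getElem_cons hd
      rw [htop]
      have harr : p.length + 1 - m = (p.length - m) + 1 := by omega
      by_cases hg : l[p.length - m] < g
      · simp only [if_pos hg]
        rw [harr, insertAsc_drop_of_lt g l hpw _ hd hg]
      · simp only [if_neg hg]
        rw [harr, insertAsc_drop_of_le g l hpw _ hd (not_lt.mp hg), htop]

-- B's whole loop: the buffer is the ascending suffix of the K-1 largest gaps
theorem topInv (K : Int) (p : List Int) :
    p.foldl (pvStep K) [] = (PySem.List.sorted p (fun x => x) false).drop (p.length - (K - 1).toNat) := by
  induction p using List.reverseRecOn with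
  | nil => simp [PySem.List.sorted]
  | append_singleton p g ih =>
      rw [List.foldl_append, List.foldl_cons, List.foldl_nil, ih, step_drop]
      simp

-- A's gap-building foldl builds the diffs list
theorem gaps_eq_map (s : List Int) :
    (PySem.List.pyRange 1 (PySem.List.len s) 1).foldl
      (fun ds i => ds ++ [PySem.List.pyGetD s i 0 - PySem.List.pyGetD s (i - 1) 0]) []
    = (PySem.List.pyRange 1 (PySem.List.len s) 1).map
      (fun i => PySem.List.pyGetD s i 0 - PySem.List.pyGetD s (i - 1) 0) := by
  rw [PySem.List.foldl_append_singleton_eq_map, List.nil_append]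

-- the diffs list is the zipWith of adjacent differences
theorem gaps_eq_zip (s : List Int) :
    (PySem.List.pyRange 1 (PySem.List.len s) 1).map
      (fun i => PySem.List.pyGetD s i 0 - PySem.List.pyGetD s (i - 1) 0)
    = List.zipWith (fun a b => b - a) s (s.drop 1) := by
  rw [PySem.List.pyRange_one, List.map_map, PySem.List.len_eq]
  apply List.ext_getElem
  · simp [List.length_zipWith]
  · intro k h1 h2
    simp only [List.getElem_map, List.getElem_range, Function.comp, List.getElem_zipWith]
    have hk : k + 1 < s.length := by
      simp only [List.length_map, List.length_range] at h1; omega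
    have e2 : (1 : Int) + (k : Int) - 1 = ((k : Nat) : Int) := by ring
    have e1 : (1 : Int) + (k : Int) = ((k + 1 : Nat) : Int) := by push_cast; ring
    rw [e2, e1, PySem.List.pyGetD_natCast, PySem.List.pyGetD_natCast,
        List.getD_eq_getElem s 0 hk, List.getD_eq_getElem s 0 (by omega),
        List.getElem_drop]
    simp only [Nat.add_comm 1 k]

-- telescoping sum of adjacent differences
theorem tele (x : Int) (t : List Int) :
    (List.zipWith (fun a b => b - a) (x :: t) t).sum = (x :: t).getLast (by simp) - x := by
  induction t generalizing x with
  | nil => simp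
  | cons y t' ih => simp [List.getLast_cons, ih y]

-- A's pop(0)-loop over any driver list drops one front element per step.
theorem popLoop_eq_drop (l : List Int) : ∀ (ds : List Int), l.length ≤ ds.length →
    l.foldl (fun ds _ => ((PySem.List.pop? ds 0).map Prod.snd).getD ds) ds = ds.drop l.length := by
  induction l with
  | nil => intro ds _; simp
  | cons a t ih =>
      intro ds h
      cases ds with
      | nil => simp at h
      | cons d ds' =>
          simpa [PySem.List.pop?_zero_cons] using ih ds' (by simpa using h)

-- descending sort is the reverse of the ascending sort (Int: equal keys are equal values)
theorem sorted_rev_eq_reverse_sorted (g : List Int) :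
    PySem.List.sorted g (fun x => x) true = (PySem.List.sorted g (fun x => x) false).reverse := by
  have h1 : (PySem.List.sorted g (fun x => x) true).reverse.Perm
      (PySem.List.sorted g (fun x => x) false) :=
    ((List.reverse_perm _).trans (PySem.List.sorted_perm ..)).trans
      (PySem.List.sorted_perm ..).symm
  have h2 : (PySem.List.sorted g (fun x => x) true).reverse.Pairwise (· ≤ ·) := by
    rw [List.pairwise_reverse]
    exact PySem.List.sorted_pairwise_rev g (fun x => x)
  have h3 : (PySem.List.sorted g (fun x => x) false).Pairwise (· ≤ ·) :=
    PySem.List.sorted_pairwise g (fun x => x)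
  have heq := PySem.List.eq_of_perm_of_pairwise_le_of_injective (fun x : Int => x)
      (fun _ _ h => h) h1 h2 h3
  calc PySem.List.sorted g (fun x => x) true
      = (PySem.List.sorted g (fun x => x) true).reverse.reverse := by simp
    _ = (PySem.List.sorted g (fun x => x) false).reverse := by rw [heq]

-- ===== VERDICT (by name: the statement is the Claim_ definition above) =====
-- range max - min equals the sum of all adjacent gaps (telescoping)
theorem total_eq (s : List Int) :
    (if 2 ≤ s.length then PySem.List.pyGetD s (-1) 0 - PySem.List.pyGetD s 0 0 else 0)
      = (List.zipWith (fun a b => b - a) s (s.drop 1)).sum := by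
  match s with
  | [] => simp
  | [x] => simp
  | x :: y :: t =>
      rw [if_pos (by simp), PySem.List.pyGetD_neg_one (x :: y :: t) 0 (by simp),
          PySem.List.pyGetD_zero_cons]
      have hd : (x :: y :: t).drop 1 = y :: t := rfl
      rw [hd, tele x (y :: t)]

theorem minimize_max_diff_spec : Claim_equal_minimize_max_diff := by
  intro arr K _ hpre
  unfold Pre_minimize_max_diff at hpre
  unfold Spec_minimize_max_diff minimize_max_diff minimize_max_diff_alt
  simp only [gaps_eq_map]
  set s := PySem.List.sorted arr (fun x => x) false with hs
  have hslen : s.length = arr.length := PySem.List.length_sorted ..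
  set D := (PySem.List.pyRange 1 (PySem.List.len s) 1).map
      (fun i => PySem.List.pyGetD s i 0 - PySem.List.pyGetD s (i - 1) 0) with hD
  have hDlen : D.length = s.length - 1 := by
    rw [hD, List.length_map, PySem.List.length_pyRange_one, PySem.List.len_eq]; omega
  have hK : (K - 1).toNat ≤ D.length := by
    rw [hDlen]; omega
  have hSDlen : (PySem.List.sorted D (fun x => x) false).length = D.length :=
    PySem.List.length_sorted ..
  -- B's fold over indices is the fold of pvStep over D
  have hBfold : (PySem.List.pyRange 1 (PySem.List.len s) 1).foldl
      (fun top i => pvStep K top (PySem.List.pyGetD s i 0 - PySem.List.pyGetD s (i - 1) 0)) []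
      = D.foldl (pvStep K) [] := by
    rw [hD, List.foldl_map]
  -- A's value: sum of the ascending-sorted gaps minus their largest K-1 suffix
  have hdriver : (PySem.List.pyRange 0 (K - 1) 1).length = (K - 1).toNat := by
    rw [PySem.List.length_pyRange_one]; omega
  rw [sorted_rev_eq_reverse_sorted D,
      popLoop_eq_drop _ _ (by rw [hdriver, List.length_reverse, hSDlen]; exact hK),
      hdriver, List.drop_reverse, List.sum_reverse]
  -- B's value
  rw [hBfold, topInv K D, total_eq s, ← gaps_eq_zip s, ← hD]
  have hsum : (PySem.List.sorted D (fun x => x) false).sum = D.sum :=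
    (PySem.List.sorted_perm ..).sum_eq
  have hsplit := List.sum_take_add_sum_drop (PySem.List.sorted D (fun x => x) false)
      ((PySem.List.sorted D (fun x => x) false).length - (K - 1).toNat)
  rw [hSDlen] at hsplit ⊢
  omega
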